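-- pv_equiv track=rewrite | github.com/g2git/adventofcode | 16-reindeer_maze.py | count_positions_in_multiple_paths
-- ===== SOURCE A (Python) =====
-- def count_positions_in_multiple_paths(paths):
--     position_count = {}
--     for path in paths:
--         for position in path:
--             if position in position_count:
--                 position_count[position] += 1
--             else:
--                 position_count[position] = 1
--
--     return sum(1 for count in position_count.values() if count > 1)
-- ===== SOURCE B (Python) =====
-- def count_positions_in_multiple_paths(paths):
--     positions = sorted(p for path in paths for p in path)
--     total = 0
--     in_run = False
--     for prev, cur in zip(positions, positions[1:]):
--         if cur == prev:
--             if not in_run: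
--                 total += 1
--                 in_run = True
--         else:
--             in_run = False
--     return total
-- ===== Notes on version B (the rewrite author's own statement) =====
-- stated objective: alternative
-- what changed: Replaces A's hash-counting (a frequency dict built in one sweep, then a values>1 scan) with sort-then-scan: flatten all paths, sort the positions lexicographically, and count starts of runs of equal adjacent elements in one zip(ps, ps[1:]) pass; no dict, set or counts are ever stored.
import Mathlib
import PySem

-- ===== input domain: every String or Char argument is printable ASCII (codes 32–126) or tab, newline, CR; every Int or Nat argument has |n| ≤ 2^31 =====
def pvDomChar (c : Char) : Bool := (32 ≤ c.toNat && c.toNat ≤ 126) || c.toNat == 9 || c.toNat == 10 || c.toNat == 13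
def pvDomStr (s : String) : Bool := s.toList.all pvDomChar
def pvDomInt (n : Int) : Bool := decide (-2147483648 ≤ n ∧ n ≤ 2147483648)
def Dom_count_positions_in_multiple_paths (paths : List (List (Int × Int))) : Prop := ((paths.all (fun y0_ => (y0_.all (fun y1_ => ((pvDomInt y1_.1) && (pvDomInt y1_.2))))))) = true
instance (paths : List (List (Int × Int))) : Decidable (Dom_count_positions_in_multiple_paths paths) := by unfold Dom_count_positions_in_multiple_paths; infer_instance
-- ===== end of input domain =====

-- B replaces A's frequency-dict counting with sort-then-scan: flatten, sort the positions
-- lexicographically, and count starts of duplicate runs in one adjacent-pair pass (objective: alternative).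

-- ===== PORT A =====
def count_positions_in_multiple_paths (paths : List (List (Int × Int))) : Int :=
  let position_count : PySem.Dict (Int × Int) Int :=
    paths.foldl (fun d path =>
      path.foldl (fun d position =>
        if d.contains position then d.insert position (d.getD position 0 + 1)
        else d.insert position 1) d)
      PySem.Dict.empty
  -- sum(1 for count in position_count.values() if count > 1): one 1 per value > 1
  ((position_count.values.countP (fun count => decide ((1:Int) < count)) : Nat) : Int)

-- ===== PORT B =====
-- the body of B's 'for prev, cur in zip(positions, positions[1:])' loop; state = (total, in_run)
def cpimpAdjStep (st : Int × Bool) (pr : (Int × Int) × (Int × Int)) : Int × Bool :=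
  if pr.2 == pr.1 then (if !st.2 then (st.1 + 1, true) else st) else (st.1, false)

def count_positions_in_multiple_paths_alt (paths : List (List (Int × Int))) : Int :=
  -- sorted(p for path in paths for p in path); Python orders (int, int) tuples lexicographically
  let positions := PySem.List.sorted (paths.flatMap (fun path => path)) (fun p => toLex p)
  let st := (positions.zip positions.tail).foldl cpimpAdjStep ((0 : Int), false)
  st.1

-- ===== PRECONDITION & SPEC =====
def Spec_count_positions_in_multiple_paths (paths : List (List (Int × Int))) (out : Int) : Prop := out = count_positions_in_multiple_paths_alt paths
instance (paths : List (List (Int × Int))) (out : Int) : Decidable (Spec_count_positions_in_multiple_paths paths out) := by unfold Spec_count_positions_in_multiple_paths; infer_instance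

-- ===== CLAIM (what is proved, stated in full; the proofs are below) =====
def Claim_equal_count_positions_in_multiple_paths : Prop := ∀ (paths : List (List (Int × Int))), Dom_count_positions_in_multiple_paths paths → Spec_count_positions_in_multiple_paths paths (count_positions_in_multiple_paths paths)

-- ===== LEMMAS AND PROOFS =====

-- proof-side characterisation of B's scan: one count per maximal run of equal adjacent
-- elements of length >= 2, by run recursion
def cpimpSpecCount : List (Int × Int) → Int
  | [] => 0
  | x :: rest =>
      (if rest.takeWhile (fun a => a == x) = [] then 0 else 1) +
        cpimpSpecCount (rest.dropWhile (fun a => a == x))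
  termination_by ys => ys.length
  decreasing_by simpa using Nat.lt_succ_of_le (List.length_dropWhile_le _ _)

-- A's inner step is the standard counter-insert step.
theorem cpimpA_step_eq :
    (fun (d : PySem.Dict (Int × Int) Int) (position : Int × Int) =>
      if d.contains position then d.insert position (d.getD position 0 + 1)
      else d.insert position 1)
    = (fun d position => d.insert position (d.getD position 0 + 1)) := by
  funext d position
  by_cases hc : d.contains position = true
  · simp [hc]
  · simp [hc, PySem.Dict.getD_of_not_contains d (0 : Int) (by simpa using hc)]

-- adjacent pairs of a cons
theorem cpimpZip_cons (x h : Int × Int) (l : List (Int × Int)) :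
    ((x :: h :: l).zip (x :: h :: l).tail) = (x, h) :: ((h :: l).zip (h :: l).tail) := by
  simp [List.zip]

-- scanning the tail of a run with the flag set consumes the run without counting
theorem cpimpRun_true (t : List (Int × Int)) : ∀ (x : Int × Int) (d : List (Int × Int)) (c : Int),
    (∀ a ∈ t, a = x) → (∀ h l, d = h :: l → h ≠ x) →
    (((x :: (t ++ d)).zip (x :: (t ++ d)).tail).foldl cpimpAdjStep (c, true)).1
      = ((d.zip d.tail).foldl cpimpAdjStep (c, false)).1 := by
  induction t with
  | nil =>
    intro x d c _ hd
    cases d with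
    | nil => simp
    | cons h l =>
      rw [List.nil_append, cpimpZip_cons, List.foldl_cons]
      have hne : ¬ (h = x) := hd h l rfl
      simp [cpimpAdjStep, hne]
  | cons a t' ih =>
    intro x d c ht hd
    have hax : a = x := ht a (by simp)
    subst hax
    rw [List.cons_append, cpimpZip_cons, List.foldl_cons]
    have : cpimpAdjStep (c, true) (a, a) = (c, true) := by simp [cpimpAdjStep]
    rw [this]
    exact ih a d c (fun b hb => ht b (by simp [hb])) hd

-- B's adjacent scan computes cpimpSpecCount (no sortedness needed)
theorem cpimpScan_eq_spec : ∀ (n : Nat) (ys : List (Int × Int)), ys.length ≤ n → ∀ (c : Int),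
    ((ys.zip ys.tail).foldl cpimpAdjStep (c, false)).1 = c + cpimpSpecCount ys := by
  intro n
  induction n with
  | zero =>
    intro ys hlen c
    have : ys = [] := List.length_eq_zero_iff.1 (Nat.le_zero.1 hlen)
    subst this; simp [cpimpSpecCount]
  | succ m ih =>
    intro ys hlen c
    cases ys with
    | nil => simp [cpimpSpecCount]
    | cons x rest =>
      have hrest : rest.length ≤ m := by simpa using hlen
      cases rest with
      | nil => simp [cpimpSpecCount]
      | cons h l =>
        by_cases hhx : h = x
        · -- a duplicate run starts: count 1, skip it with the flag set
          subst hhx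
          rw [cpimpZip_cons, List.foldl_cons]
          have hstep : cpimpAdjStep (c, false) (h, h) = (c + 1, true) := by
            simp [cpimpAdjStep]
          rw [hstep]
          have hT : ∀ a ∈ l.takeWhile (fun a => a == h), a = h := by
            intro a ha
            simpa using List.mem_takeWhile_imp ha
          have hD : ∀ h' l', l.dropWhile (fun a => a == h) = h' :: l' → h' ≠ h := by
            intro h' l' hdl
            have := List.head?_dropWhile_not (fun a => a == h) l
            rw [hdl] at this
            simpa using this
          have hdecomp : l = (l.takeWhile (fun a => a == h)) ++ (l.dropWhile (fun a => a == h)) :=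
            (List.takeWhile_append_dropWhile).symm
          have hrun := cpimpRun_true (l.takeWhile (fun a => a == h)) h
            (l.dropWhile (fun a => a == h)) (c + 1) hT hD
          rw [← hdecomp] at hrun
          rw [hrun]
          rw [ih (l.dropWhile (fun a => a == h))
            (by have := List.length_dropWhile_le (fun a => a == h) l
                simp only [List.length_cons] at hrest
                omega) (c + 1)]
          rw [show cpimpSpecCount (h :: (h :: l)) =
              (if (h :: l).takeWhile (fun a => a == h) = [] then 0 else 1) +
                cpimpSpecCount ((h :: l).dropWhile (fun a => a == h)) from by
            rw [cpimpSpecCount]]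
          have htw : ¬ ((h :: l).takeWhile (fun a => a == h) = []) := by
            simp
          have hdw : (h :: l).dropWhile (fun a => a == h) = l.dropWhile (fun a => a == h) := by
            simp
          rw [if_neg htw, hdw]
          ring
        · -- no run at the head
          rw [cpimpZip_cons, List.foldl_cons]
          have hstep : cpimpAdjStep (c, false) (x, h) = (c, false) := by
            simp [cpimpAdjStep, hhx]
          rw [hstep]
          rw [ih (h :: l) hrest c]
          rw [show cpimpSpecCount (x :: (h :: l)) =
              (if (h :: l).takeWhile (fun a => a == x) = [] then 0 else 1) +
                cpimpSpecCount ((h :: l).dropWhile (fun a => a == x)) from by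
            rw [cpimpSpecCount]]
          have htw : (h :: l).takeWhile (fun a => a == x) = [] := by
            simp [hhx]
          have hdw : (h :: l).dropWhile (fun a => a == x) = h :: l := by
            simp [hhx]
          rw [htw, hdw]
          simp
-- prefix-preservation for Set.add folds when the head occurs nowhere later
theorem cpimpFoldl_add_cons (d : List (Int × Int)) : ∀ (s : List (Int × Int)) (x : Int × Int),
    x ∉ d → d.foldl PySem.Set.add (x :: s) = x :: d.foldl PySem.Set.add s := by
  induction d with
  | nil => intro s x _; rfl
  | cons a d' ih =>
    intro s x hx
    have hax : a ≠ x := by rintro rfl; exact hx (by simp)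
    have : PySem.Set.add (x :: s) a = x :: PySem.Set.add s a := by
      simp only [PySem.Set.add, PySem.Set.contains]
      by_cases hs : a ∈ s <;> simp [hs, hax]
    rw [List.foldl_cons, this, List.foldl_cons]
    exact ih _ x (fun h => hx (by simp [h]))

-- a run of copies of an element already present adds nothing to a Set.add fold
theorem cpimpFoldl_add_run (t : List (Int × Int)) : ∀ (s : List (Int × Int)) (x : Int × Int),
    (∀ a ∈ t, a = x) → x ∈ s → t.foldl PySem.Set.add s = s := by
  induction t with
  | nil => intro s x _ _; rfl
  | cons a t' ih =>
    intro s x ht hs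
    have hax : a = x := ht a (by simp)
    subst hax
    rw [List.foldl_cons, show PySem.Set.add s a = s from by simp [PySem.Set.add, PySem.Set.contains, hs]]
    exact ih s a (fun b hb => ht b (by simp [hb])) hs

-- on a lexicographically sorted list the run count is the number of distinct elements of count ≥ 2
theorem cpimpSpec_sorted : ∀ (n : Nat) (ys : List (Int × Int)), ys.length ≤ n →
    ys.Pairwise (fun a b => toLex a ≤ toLex b) →
    cpimpSpecCount ys = ((PySem.Set.ofList ys).countP (fun k => decide (2 ≤ ys.count k)) : Nat) := by
  intro n
  induction n with
  | zero =>
    intro ys hlen _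
    have : ys = [] := List.length_eq_zero_iff.1 (Nat.le_zero.1 hlen)
    subst this; simp [cpimpSpecCount, PySem.Set.ofList]
  | succ m ih =>
    intro ys hlen hpair
    cases ys with
    | nil => simp [cpimpSpecCount, PySem.Set.ofList]
    | cons x rest =>
      have hrest : rest.length ≤ m := by simpa using hlen
      have hpc := List.pairwise_cons.1 hpair
      have hT : ∀ a ∈ rest.takeWhile (fun a => a == x), a = x := by
        intro a ha
        simpa using List.mem_takeWhile_imp ha
      have hdecomp : rest = (rest.takeWhile (fun a => a == x)) ++ (rest.dropWhile (fun a => a == x)) :=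
        (List.takeWhile_append_dropWhile).symm
      have hdsub : (rest.dropWhile (fun a => a == x)).Sublist rest := List.dropWhile_sublist _
      have hdpair : (rest.dropWhile (fun a => a == x)).Pairwise (fun a b => toLex a ≤ toLex b) :=
        hpc.2.sublist hdsub
      -- x does not occur after its initial run
      have hxd : x ∉ rest.dropWhile (fun a => a == x) := by
        intro hxin
        obtain ⟨h', l', hd⟩ : ∃ h' l', rest.dropWhile (fun a => a == x) = h' :: l' := by
          cases hq : rest.dropWhile (fun a => a == x) with
          | nil => rw [hq] at hxin; simp at hxin
          | cons a b => exact ⟨a, b, rfl⟩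
        have hne : ¬ (h' = x) := by
          have := List.head?_dropWhile_not (fun a => a == x) rest
          rw [hd] at this
          simpa using this
        have hxl' : x ∈ l' := by
          rcases List.mem_cons.1 (hd ▸ hxin) with he | hxl'
          · exact absurd he.symm hne
          · exact hxl'
        have hh'mem : h' ∈ rest := hdsub.subset (by rw [hd]; exact List.mem_cons_self)
        have hle1 : toLex x ≤ toLex h' := hpc.1 h' hh'mem
        have hdp' := hdpair
        rw [hd] at hdp'
        have hle2 : toLex h' ≤ toLex x := (List.pairwise_cons.1 hdp').1 x hxl'
        exact hne (toLex_inj.1 (le_antisymm hle2 hle1))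
      -- counts in x :: rest
      have hcx : (x :: rest).count x = (rest.takeWhile (fun a => a == x)).length + 1 := by
        rw [List.count_cons_self]
        congr 1
        conv_lhs => rw [hdecomp]
        rw [List.count_append, List.count_eq_length.2 (fun b hb => (hT b hb).symm),
            List.count_eq_zero.2 hxd]
        omega
      have hck : ∀ k, k ≠ x → (x :: rest).count k = (rest.dropWhile (fun a => a == x)).count k := by
        intro k hk
        have hcons : (x :: rest).count k = rest.count k := by
          rw [List.count_cons]
          simp [Ne.symm hk]
        rw [hcons]
        conv_lhs => rw [hdecomp]
        rw [List.count_append, List.count_eq_zero.2 (fun hkin => hk (hT k hkin))]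
        simp
      -- the set of x :: rest is x prepended to the set of the remainder after x's run
      have hset : PySem.Set.ofList (x :: rest)
          = x :: PySem.Set.ofList (rest.dropWhile (fun a => a == x)) := by
        rw [PySem.Set.ofList_eq_foldl, PySem.Set.ofList_eq_foldl, List.foldl_cons]
        have h1 : PySem.Set.add [] x = [x] := by simp [PySem.Set.add, PySem.Set.contains]
        rw [h1]
        conv_lhs => rw [hdecomp]
        rw [List.foldl_append, cpimpFoldl_add_run _ [x] x hT (by simp),
            cpimpFoldl_add_cons _ [] x hxd]
      -- assemble
      rw [show cpimpSpecCount (x :: rest) =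
          (if rest.takeWhile (fun a => a == x) = [] then 0 else 1) +
            cpimpSpecCount (rest.dropWhile (fun a => a == x)) from by rw [cpimpSpecCount]]
      rw [hset, List.countP_cons]
      have hcongr : (PySem.Set.ofList (rest.dropWhile (fun a => a == x))).countP
            (fun k => decide (2 ≤ (x :: rest).count k))
          = (PySem.Set.ofList (rest.dropWhile (fun a => a == x))).countP
            (fun k => decide (2 ≤ (rest.dropWhile (fun a => a == x)).count k)) := by
        refine List.countP_congr ?_
        intro k hk
        have hkmem : k ∈ rest.dropWhile (fun a => a == x) := (PySem.Set.mem_ofList _ _).1 hk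
        have hkx : k ≠ x := fun h => hxd (h ▸ hkmem)
        simp [hck k hkx]
      rw [hcongr]
      rw [ih (rest.dropWhile (fun a => a == x))
        (le_trans (List.Sublist.length_le hdsub) hrest) hdpair]
      by_cases htw : rest.takeWhile (fun a => a == x) = []
      · have hc0 : decide (2 ≤ (x :: rest).count x) = false := by
          rw [hcx, htw]
          simp
        rw [if_pos htw, hc0]
        simp
      · have hlen' : 1 ≤ (rest.takeWhile (fun a => a == x)).length := by
          cases hq : rest.takeWhile (fun a => a == x) with
          | nil => exact absurd hq htw
          | cons _ _ => simp
        have hc1 : decide (2 ≤ (x :: rest).count x) = true := by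
          rw [hcx]
          exact decide_eq_true (by omega)
        rw [if_neg htw, hc1, if_pos rfl]
        push_cast
        ring

-- ===== VERDICT (by name: the statement is the Claim_ definition above) =====
theorem count_positions_in_multiple_paths_spec : Claim_equal_count_positions_in_multiple_paths := by
  intro paths _
  unfold Spec_count_positions_in_multiple_paths
  simp only [count_positions_in_multiple_paths, count_positions_in_multiple_paths_alt]
  rw [← List.foldl_flatten, List.flatMap_id']
  set xs := paths.flatten with hxs
  -- A side: the dict is counter xs, its qualifying values are the distinct elements of count ≥ 2
  rw [cpimpA_step_eq, PySem.Dict.foldl_insert_getD_add_one_eq_counter]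
  have hAvals : (PySem.Dict.counter xs).values
      = (PySem.Set.ofList xs).map (fun k => (xs.count k : Int)) := by
    rw [PySem.Dict.values_eq_map_keys _ (PySem.Dict.nodup_keys_counter xs) 0,
        PySem.Dict.keys_counter]
    exact List.map_congr_left (fun k _ => PySem.Dict.getD_counter xs k)
  rw [hAvals, List.countP_map]
  have hApred : List.countP ((fun count => decide ((1:Int) < count)) ∘ fun k => (xs.count k : Int))
        (PySem.Set.ofList xs)
      = List.countP (fun k => decide (2 ≤ xs.count k)) (PySem.Set.ofList xs) := by
    refine List.countP_congr ?_
    intro k _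
    simp only [Function.comp]
    constructor
    · intro h
      have : (1:Int) < (xs.count k : Int) := of_decide_eq_true h
      exact decide_eq_true (by exact_mod_cast this)
    · intro h
      have : 2 ≤ xs.count k := of_decide_eq_true h
      exact decide_eq_true (by exact_mod_cast (by omega : (1:Int) < (xs.count k : Int)))
  rw [hApred]
  -- B side: sort, then count duplicate runs
  set ys := PySem.List.sorted xs (fun p => toLex p) with hys
  have hperm : ys.Perm xs := PySem.List.sorted_perm xs (fun p => toLex p) false
  have hpair : ys.Pairwise (fun a b => toLex a ≤ toLex b) :=
    PySem.List.sorted_pairwise xs (fun p => toLex p)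
  have hB : ((ys.zip ys.tail).foldl cpimpAdjStep ((0:Int), false)).1 = cpimpSpecCount ys := by
    have := cpimpScan_eq_spec ys.length ys le_rfl 0
    omega
  rw [hB, cpimpSpec_sorted ys.length ys le_rfl hpair]
  -- both count the same distinct elements: the filtered nodup key lists are permutations
  have hfilter : ((PySem.Set.ofList xs).filter (fun k => decide (2 ≤ xs.count k))).Perm
      ((PySem.Set.ofList ys).filter (fun k => decide (2 ≤ ys.count k))) := by
    rw [List.perm_ext_iff_of_nodup (List.Nodup.filter _ (PySem.Set.nodup_ofList xs))
        (List.Nodup.filter _ (PySem.Set.nodup_ofList ys))]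
    intro p
    simp only [List.mem_filter, PySem.Set.mem_ofList]
    rw [hperm.mem_iff, hperm.count_eq]
  rw [List.countP_eq_length_filter, List.countP_eq_length_filter, hfilter.length_eq]
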